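-- pv_equiv track=rewrite | github.com/ChronicoOne/chronicoone.github.io | page_builder.py | inner_outer
-- ===== SOURCE A (Python) =====
-- def inner_outer(lines):
--     j = 1
--     open_count = 1
--     while open_count > 0 and j < len(lines):
--         if "~" in lines[j]:
--             if "\t" in lines[j]:
--                 open_count += 1
--             else:
--                 open_count -= 1
--         j += 1
--     return lines[0:j], lines[j:]
-- ===== SOURCE B (Python) =====
-- def inner_outer(lines):
--     balances = []
--     bal = 1
--     for line in lines[1:]:
--         if "~" in line:
--             bal += 1 if "\t" in line else -1
--         balances.append(bal)
--     j = len(lines)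
--     for i, b in enumerate(balances):
--         if b == 0:
--             j = i + 2
--             break
--     return lines[0:j], lines[j:]
-- ===== Notes on version B (the rewrite author's own statement) =====
-- stated objective: alternative
-- what changed: Replaced the short-circuiting index/while counter loop by a two-phase decomposition: first build the full balance table for lines[1:] with a prefix-sum scan, then find the first zero balance (default len(lines)) and split there.
import Mathlib
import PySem

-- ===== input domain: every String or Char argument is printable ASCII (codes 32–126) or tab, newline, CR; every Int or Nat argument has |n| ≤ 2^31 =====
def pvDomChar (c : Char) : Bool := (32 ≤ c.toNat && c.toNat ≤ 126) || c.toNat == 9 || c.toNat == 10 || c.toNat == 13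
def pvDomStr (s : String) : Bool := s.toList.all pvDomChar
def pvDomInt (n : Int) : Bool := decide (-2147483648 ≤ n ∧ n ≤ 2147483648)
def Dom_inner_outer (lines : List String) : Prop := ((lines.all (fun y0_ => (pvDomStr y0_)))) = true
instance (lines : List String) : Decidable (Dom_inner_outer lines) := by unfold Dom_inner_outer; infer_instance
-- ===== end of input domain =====

-- B splits the work into building the full balance table then finding its first zero,
-- instead of A's short-circuiting while-loop counter (objective: alternative decomposition).


-- ===== PORT A =====
-- A's while loop: state (j, open_count); lines[j] is read with getD (the loop guard ensures j < len).
def innerOuterLoopA (lines : List String) (j : Nat) (openCount : Int) : Nat :=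
  if _h : openCount > 0 ∧ j < lines.length then
    let line := lines.getD j ""
    let openCount' :=
      if PySem.Str.isIn "~" line then
        if PySem.Str.isIn "\t" line then openCount + 1 else openCount - 1
      else openCount
    innerOuterLoopA lines (j + 1) openCount'
  else j
termination_by lines.length - j
decreasing_by omega

def inner_outer (lines : List String) : List String × List String :=
  let j := innerOuterLoopA lines 1 1
  (PySem.List.slice lines (some 0) (some (j : Int)), PySem.List.slice lines (some (j : Int)) none)

-- ===== PORT B =====
-- the for/break search: first index i with balances[i] = 0 gives j = i + 2, else the default d
def innerOuterFindJ (balances : List Int) (i : Nat) (d : Nat) : Nat :=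
  match balances with
  | [] => d
  | b :: rest => if b = 0 then i + 2 else innerOuterFindJ rest (i + 1) d

def inner_outer_alt (lines : List String) : List String × List String :=
  let st := (PySem.List.slice lines (some 1) none).foldl
    (fun (s : Int × List Int) line =>
      let bal :=
        if PySem.Str.isIn "~" line then
          if PySem.Str.isIn "\t" line then s.1 + 1 else s.1 - 1
        else s.1
      (bal, s.2 ++ [bal]))
    (1, [])
  let j := innerOuterFindJ st.2 0 lines.length
  (PySem.List.slice lines (some 0) (some (j : Int)), PySem.List.slice lines (some (j : Int)) none)

-- ===== PRECONDITION & SPEC =====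
def Spec_inner_outer (lines : List String) (out : List String × List String) : Prop := out = inner_outer_alt lines
instance (lines : List String) (out : List String × List String) : Decidable (Spec_inner_outer lines out) := by unfold Spec_inner_outer; infer_instance

-- ===== CLAIM (what is proved, stated in full; the proofs are below) =====
def Claim_equal_inner_outer : Prop := ∀ (lines : List String), Dom_inner_outer lines → Spec_inner_outer lines (inner_outer lines)

-- ===== LEMMAS AND PROOFS =====

-- per-line balance delta
def pvDelta (line : String) : Int :=
  if PySem.Str.isIn "~" line then
    if PySem.Str.isIn "\t" line then 1 else -1
  else 0

-- abstract version of A's loop over the remaining tail: lines consumed while the balance is positive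
def pvRun : List String → Int → Nat
  | [], _ => 0
  | l :: rest, oc => if oc > 0 then 1 + pvRun rest (oc + pvDelta l) else 0

-- balance scan of the tail (what B's fold appends)
def pvScan : List String → Int → List Int
  | [], _ => []
  | l :: rest, b => (b + pvDelta l) :: pvScan rest (b + pvDelta l)

lemma pvRun_nonpos (tl : List String) (oc : Int) (h : oc ≤ 0) : pvRun tl oc = 0 := by
  cases tl <;> simp [pvRun] ; omega

lemma pvDelta_ge (l : String) : -1 ≤ pvDelta l := by
  unfold pvDelta; split_ifs <;> omega

-- A's loop equals j plus the abstract run over the dropped tail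
lemma loopA_eq_run (n : Nat) : ∀ (lines : List String) (j : Nat) (oc : Int),
    n = lines.length - j →
    innerOuterLoopA lines j oc = j + pvRun (lines.drop j) oc := by
  induction n with
  | zero =>
    intro lines j oc h
    rw [innerOuterLoopA]
    have hj : lines.length ≤ j := by omega
    rw [List.drop_eq_nil_of_le hj]
    split_ifs with hc
    · omega
    · simp [pvRun]
  | succ m ih =>
    intro lines j oc h
    rw [innerOuterLoopA]
    split_ifs with hc
    · have hj : j < lines.length := hc.2
      have hdrop : lines.drop j = lines[j] :: lines.drop (j + 1) :=
        List.drop_eq_getElem_cons hj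
      have hgetD : lines.getD j "" = lines[j] := List.getD_eq_getElem lines "" hj
      rw [ih lines (j + 1) _ (by omega), hdrop]
      simp only [pvRun, pvDelta, hgetD, if_pos hc.1]
      split_ifs <;> (try simp only [sub_eq_add_neg, add_zero]) <;> omega
    · rcases (by omega : oc ≤ 0 ∨ lines.length ≤ j) with h1 | h1
      · rw [pvRun_nonpos _ _ h1]; omega
      · rw [List.drop_eq_nil_of_le h1]; simp [pvRun]

-- B's fold produces the scan of the tail
lemma fold_eq_scan (tl : List String) : ∀ (b : Int) (acc : List Int),
    (tl.foldl
      (fun (s : Int × List Int) line =>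
        ((if PySem.Str.isIn "~" line then
            if PySem.Str.isIn "\t" line then s.1 + 1 else s.1 - 1
          else s.1),
         s.2 ++ [(if PySem.Str.isIn "~" line then
            if PySem.Str.isIn "\t" line then s.1 + 1 else s.1 - 1
          else s.1)]))
      (b, acc)).2 = acc ++ pvScan tl b := by
  induction tl with
  | nil => intro b acc; simp [pvScan]
  | cons l rest ih =>
    intro b acc
    simp only [List.foldl_cons]
    have hstep : (if PySem.Str.isIn "~" l then
          if PySem.Str.isIn "\t" l then b + 1 else b - 1
        else b) = b + pvDelta l := by
      unfold pvDelta; split_ifs <;> omega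
    simp only [hstep, ih, pvScan, List.append_assoc, List.singleton_append]

-- B's search over the scan computes the same count as A's run (the balance moves by at most 1
-- down each step, so the first nonpositive balance is exactly the first zero)
lemma findJ_scan_eq_run (tl : List String) : ∀ (oc : Int) (i : Nat), 0 < oc →
    innerOuterFindJ (pvScan tl oc) i (i + 1 + tl.length) = i + 1 + pvRun tl oc := by
  induction tl with
  | nil => intro oc i h; simp [pvScan, innerOuterFindJ, pvRun]
  | cons l rest ih =>
    intro oc i h
    simp only [pvScan, innerOuterFindJ, pvRun, if_pos h]
    by_cases hz : oc + pvDelta l = 0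
    · rw [if_pos hz, pvRun_nonpos rest _ (by omega)]
    · rw [if_neg hz]
      have hpos : 0 < oc + pvDelta l := by have := pvDelta_ge l; omega
      have hh := ih (oc + pvDelta l) (i + 1) hpos
      have hlen : i + 1 + (l :: rest).length = (i + 1) + 1 + rest.length := by
        simp; omega
      rw [hlen, hh]; omega

-- ===== VERDICT (by name: the statement is the Claim_ definition above) =====
theorem inner_outer_spec : Claim_equal_inner_outer := by
  unfold Claim_equal_inner_outer Spec_inner_outer
  intro lines _
  unfold inner_outer inner_outer_alt
  dsimp only
  cases lines with
  | nil =>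
    have h1 : innerOuterLoopA [] 1 1 = 1 := by rw [innerOuterLoopA]; simp
    simp [h1, innerOuterFindJ, PySem.List.slice]
  | cons l0 tl =>
    have htail : PySem.List.slice (l0 :: tl) (some 1) none = tl := by
      simpa using PySem.List.slice_from_natCast (l0 :: tl) 1
    rw [htail, fold_eq_scan tl 1 []]
    have hlen : (l0 :: tl).length = 0 + 1 + tl.length := by simp [Nat.add_comm]
    simp only [List.nil_append]
    rw [hlen, findJ_scan_eq_run tl 1 0 (by omega),
        loopA_eq_run tl.length (l0 :: tl) 1 1 (by simp)]
    simp
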